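-- pv_equiv track=rewrite | github.com/MohamedHamisa/Cheif-Hopper | code.py | chiefHopper
-- ===== SOURCE A (Python) =====
-- def chiefHopper(arr):
--     start_energy = 0
--     while True:
--         energy = start_energy
--         for item in arr:
--             energy = energy * 2 - item
--             if energy < 0:
--                 break
--         if energy >= 0:
--             return start_energy
--         start_energy += 1
-- ===== SOURCE B (Python) =====
-- def chiefHopper(arr):
--     e = 0
--     for item in reversed(arr):
--         e = max(0, (e + item + 1) // 2)
--     return e
-- ===== Notes on version B (the rewrite author's own statement) =====
-- stated objective: faster
-- what changed: Replaces A's linear search over candidate start energies (re-simulating the whole tower list for each candidate) with a single backward pass computing the minimal needed energy as e = max(0, ceil((e+item)/2)).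
import Mathlib
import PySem

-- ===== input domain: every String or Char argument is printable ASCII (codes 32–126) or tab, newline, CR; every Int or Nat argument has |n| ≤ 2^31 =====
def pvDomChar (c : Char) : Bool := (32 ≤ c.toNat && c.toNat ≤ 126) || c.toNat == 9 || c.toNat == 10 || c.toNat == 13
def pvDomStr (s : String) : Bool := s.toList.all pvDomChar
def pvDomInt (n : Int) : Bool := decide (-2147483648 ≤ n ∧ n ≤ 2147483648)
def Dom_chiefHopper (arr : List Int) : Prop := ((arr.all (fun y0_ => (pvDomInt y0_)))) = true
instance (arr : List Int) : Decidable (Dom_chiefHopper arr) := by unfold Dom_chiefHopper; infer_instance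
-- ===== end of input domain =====

-- B replaces A's linear search over candidate start energies with a single backward pass (faster).

-- ===== PORT A =====
-- the inner 'for item in arr' loop with its 'if energy < 0: break' early exit
def chiefHopperInner (energy : Int) (arr : List Int) : Int :=
  match arr with
  | [] => energy
  | item :: rest =>
    let e' := energy * 2 - item
    if e' < 0 then e' else chiefHopperInner e' rest

-- backward minimal-energy value; used only to bound A's search so the while-loop terminates
def chiefHopperNeed (arr : List Int) : Int :=
  match arr with
  | [] => 0
  | item :: rest => max 0 (PySem.Int.floordiv (chiefHopperNeed rest + item + 1) 2)

-- termination helpers for the 'while True' loop below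
theorem chiefHopperNeed_nonneg (arr : List Int) : 0 ≤ chiefHopperNeed arr := by
  cases arr <;> simp [chiefHopperNeed]

theorem chiefHopperInner_iff (arr : List Int) : ∀ s : Int, 0 ≤ s →
    (0 ≤ chiefHopperInner s arr ↔ chiefHopperNeed arr ≤ s) := by
  induction arr with
  | nil => intro s hs; simp [chiefHopperInner, chiefHopperNeed, hs]
  | cons a rest ih =>
    intro s hs
    have hnr := chiefHopperNeed_nonneg rest
    simp only [chiefHopperInner, chiefHopperNeed]
    rw [PySem.Int.floordiv_eq_ediv_of_pos (by omega : (0:Int) < 2)]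
    split_ifs with h
    · simp only [max_le_iff]
      omega
    · rw [ih (s * 2 - a) (by omega)]
      simp only [max_le_iff]
      omega

-- the 'while True' search loop of A
def chiefHopperLoop (arr : List Int) (start_energy : Int) : Int :=
  let energy := chiefHopperInner start_energy arr
  if 0 ≤ energy then start_energy else chiefHopperLoop arr (start_energy + 1)
termination_by (chiefHopperNeed arr + 1 - start_energy).toNat
decreasing_by
  rename_i h
  by_cases hs : 0 ≤ start_energy
  · have : ¬ chiefHopperNeed arr ≤ start_energy := fun hle =>
      h ((chiefHopperInner_iff arr start_energy hs).mpr hle)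
    omega
  · have := chiefHopperNeed_nonneg arr
    omega

def chiefHopper (arr : List Int) : Int := chiefHopperLoop arr 0

-- ===== PORT B =====
-- 'e = 0; for item in reversed(arr): e = max(0, (e + item + 1) // 2); return e'
def chiefHopper_alt (arr : List Int) : Int :=
  arr.reverse.foldl (fun e item => max 0 (PySem.Int.floordiv (e + item + 1) 2)) 0

-- ===== PRECONDITION & SPEC =====
def Spec_chiefHopper (arr : List Int) (out : Int) : Prop := out = chiefHopper_alt arr
instance (arr : List Int) (out : Int) : Decidable (Spec_chiefHopper arr out) := by unfold Spec_chiefHopper; infer_instance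

-- ===== CLAIM (what is proved, stated in full; the proofs are below) =====
def Claim_equal_chiefHopper : Prop := ∀ (arr : List Int), Dom_chiefHopper arr → Spec_chiefHopper arr (chiefHopper arr)

-- ===== LEMMAS AND PROOFS =====
theorem chiefHopper_alt_eq_need (arr : List Int) : chiefHopper_alt arr = chiefHopperNeed arr := by
  unfold chiefHopper_alt
  rw [List.foldl_reverse]
  induction arr with
  | nil => simp [chiefHopperNeed]
  | cons a rest ih => simp only [List.foldr_cons, chiefHopperNeed, ih]

theorem chiefHopperLoop_eq (arr : List Int) : ∀ (n : Nat) (s : Int),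
    (chiefHopperNeed arr - s).toNat = n → 0 ≤ s → s ≤ chiefHopperNeed arr →
    chiefHopperLoop arr s = chiefHopperNeed arr := by
  intro n
  induction n with
  | zero =>
    intro s hn hs hle
    rw [chiefHopperLoop]
    have hok : 0 ≤ chiefHopperInner s arr :=
      (chiefHopperInner_iff arr s hs).mpr (by omega)
    simp only [if_pos hok]
    omega
  | succ n ih =>
    intro s hn hs hle
    rw [chiefHopperLoop]
    by_cases hok : 0 ≤ chiefHopperInner s arr
    · have := (chiefHopperInner_iff arr s hs).mp hok
      simp only [if_pos hok]
      omega
    · have hlt : ¬ chiefHopperNeed arr ≤ s := fun h =>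
        hok ((chiefHopperInner_iff arr s hs).mpr h)
      simp only [if_neg hok]
      exact ih (s + 1) (by omega) (by omega) (by omega)

-- ===== VERDICT (by name: the statement is the Claim_ definition above) =====
theorem chiefHopper_spec : Claim_equal_chiefHopper := by
  intro arr _
  unfold Spec_chiefHopper chiefHopper
  rw [chiefHopper_alt_eq_need]
  exact chiefHopperLoop_eq arr _ 0 rfl le_rfl (chiefHopperNeed_nonneg arr)
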